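-- pv_equiv track=rewrite | github.com/unb-mds/2024-2-Squad08 | backend/app/services/api_consumer.py | _determine_origem_recurso
-- ===== SOURCE A (Python) =====
-- from typing import List, Dict, Any, Optional
--
-- def _determine_origem_recurso(fontes_recurso: List[Dict[str, Any]]) -> str:
--
--     if not fontes_recurso:
--         return "Não informada"
--
--     origens = set(fonte.get('origem', '').lower() for fonte in fontes_recurso if fonte.get('origem'))
--
--     if 'federal' in origens:
--         return 'Federal'
--     elif 'estadual' in origens:
--         return 'Estadual'
--     elif 'municipal' in origens:
--         return 'Municipal'
--     else:
--         return 'Não informada'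
-- ===== SOURCE B (Python) =====
-- def _determine_origem_recurso(fontes_recurso):
--     rank = {'federal': 0, 'estadual': 1, 'municipal': 2}
--     labels = ['Federal', 'Estadual', 'Municipal', 'Não informada']
--     best = 3
--     for fonte in fontes_recurso:
--         origem = fonte.get('origem')
--         if origem:
--             r = rank.get(origem.lower())
--             if r is not None and r < best:
--                 best = r
--     return labels[best]
-- ===== Notes on version B (the rewrite author's own statement) =====
-- stated objective: simpler
-- what changed: Replaces A's set-comprehension pass plus elif precedence chain by a single pass maintaining a running-minimum priority rank, returning labels[best].
import Mathlib
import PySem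

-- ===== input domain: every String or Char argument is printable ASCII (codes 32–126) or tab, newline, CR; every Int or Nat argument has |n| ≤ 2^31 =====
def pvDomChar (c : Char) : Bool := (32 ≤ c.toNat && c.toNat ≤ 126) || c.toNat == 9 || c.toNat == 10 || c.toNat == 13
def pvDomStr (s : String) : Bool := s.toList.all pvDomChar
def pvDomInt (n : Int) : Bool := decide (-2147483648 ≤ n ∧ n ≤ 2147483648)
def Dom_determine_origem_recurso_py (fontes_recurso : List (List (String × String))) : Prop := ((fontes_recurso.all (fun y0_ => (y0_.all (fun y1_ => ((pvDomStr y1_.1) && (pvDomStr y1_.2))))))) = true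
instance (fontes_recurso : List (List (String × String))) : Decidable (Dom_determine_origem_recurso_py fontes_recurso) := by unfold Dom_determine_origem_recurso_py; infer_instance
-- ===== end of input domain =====

-- B replaces A's set comprehension + elif precedence chain by a single running-minimum-rank pass (objective: simpler).

-- ===== PORT A =====
-- the generator-expression set: lowered 'origem' of every fonte whose 'origem' is truthy
def pvOrigens (fontes_recurso : List (List (String × String))) : List String :=
  (fontes_recurso.filter (fun fonte =>
      match PySem.Dict.get? ⟨fonte⟩ "origem" with
      | some s => s != ""
      | none => false)).map
    (fun fonte => PySem.Str.lower (PySem.Dict.getD ⟨fonte⟩ "origem" ""))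

def determine_origem_recurso_py (fontes_recurso : List (List (String × String))) : String :=
  if fontes_recurso = [] then "Não informada"
  else
    let origens : PySem.Set String := PySem.Set.ofList (pvOrigens fontes_recurso)
    if "federal" ∈ origens then "Federal"
    else if "estadual" ∈ origens then "Estadual"
    else if "municipal" ∈ origens then "Municipal"
    else "Não informada"

-- ===== PORT B =====
-- rank.get(s) for the dict literal {'federal': 0, 'estadual': 1, 'municipal': 2}
def pvRankGet? (s : String) : Option Nat :=
  if s = "federal" then some 0
  else if s = "estadual" then some 1
  else if s = "municipal" then some 2
  else none

def pvLabels : List String := ["Federal", "Estadual", "Municipal", "Não informada"]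

-- loop body: update the running-minimum rank with this fonte
def pvStep (best : Nat) (fonte : List (String × String)) : Nat :=
  match PySem.Dict.get? ⟨fonte⟩ "origem" with
  | some origem =>
      if origem ≠ "" then
        match pvRankGet? (PySem.Str.lower origem) with
        | some r => if r < best then r else best
        | none => best
      else best
  | none => best

def determine_origem_recurso_py_alt (fontes_recurso : List (List (String × String))) : String :=
  pvLabels.getD (fontes_recurso.foldl pvStep 3) "Não informada"

-- ===== PRECONDITION & SPEC =====
def Spec_determine_origem_recurso_py (fontes_recurso : List (List (String × String))) (out : String) : Prop := out = determine_origem_recurso_py_alt fontes_recurso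
instance (fontes_recurso : List (List (String × String))) (out : String) : Decidable (Spec_determine_origem_recurso_py fontes_recurso out) := by unfold Spec_determine_origem_recurso_py; infer_instance

-- ===== CLAIM (what is proved, stated in full; the proofs are below) =====
def Claim_equal_determine_origem_recurso_py : Prop := ∀ (fontes_recurso : List (List (String × String))), Dom_determine_origem_recurso_py fontes_recurso → Spec_determine_origem_recurso_py fontes_recurso (determine_origem_recurso_py fontes_recurso)

-- ===== LEMMAS AND PROOFS =====

-- the priority rank a single fonte contributes (3 = no recognised origin)
def pvR (fonte : List (String × String)) : Nat :=
  match PySem.Dict.get? ⟨fonte⟩ "origem" with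
  | some s => if s = "" then 3 else (pvRankGet? (PySem.Str.lower s)).getD 3
  | none => 3

lemma pvRankGet?_le {s : String} {k : Nat} (h : pvRankGet? s = some k) : k ≤ 2 := by
  unfold pvRankGet? at h; split_ifs at h <;> simp_all <;> omega

lemma pvRankGet?_inj {a b : String} {k : Nat} (ha : pvRankGet? a = some k)
    (hb : pvRankGet? b = some k) : a = b := by
  unfold pvRankGet? at ha hb
  split_ifs at ha hb <;> simp_all <;> omega

lemma pvStep_eq_min {b : Nat} (hb : b ≤ 3) (fonte : List (String × String)) :
    pvStep b fonte = min b (pvR fonte) := by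
  unfold pvStep pvR
  cases h : PySem.Dict.get? ⟨fonte⟩ "origem" with
  | none => simp; omega
  | some s =>
    simp only
    by_cases hs : s = ""
    · simp [hs]; omega
    · simp [hs]
      cases hr : pvRankGet? (PySem.Str.lower s) with
      | none => simp; omega
      | some r => simp [Nat.min_def]; split_ifs <;> omega

lemma foldl_min_le_init (l : List Nat) (b : Nat) : l.foldl min b ≤ b := by
  induction l generalizing b with
  | nil => simp
  | cons x l ih => simpa using le_trans (ih (min b x)) (min_le_left b x)

lemma foldl_min_eq_or_mem (l : List Nat) (b : Nat) : l.foldl min b = b ∨ l.foldl min b ∈ l := by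
  induction l generalizing b with
  | nil => simp
  | cons x l ih =>
    rcases ih (min b x) with h | h
    · rcases le_total b x with hbx | hbx
      · left; simpa [min_eq_left hbx] using h
      · right
        have hx : List.foldl min b (x :: l) = x := by
          simp only [List.foldl_cons]
          rw [min_eq_right hbx] at h ⊢
          exact h
        rw [hx]
        exact List.mem_cons_self
    · right
      simp only [List.foldl_cons]
      exact List.mem_cons_of_mem _ h

lemma foldl_min_le_of_mem {l : List Nat} {x : Nat} (h : x ∈ l) (b : Nat) :
    l.foldl min b ≤ x := by
  induction l generalizing b with
  | nil => simp at h
  | cons y l ih =>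
    rcases List.mem_cons.mp h with rfl | h
    · exact le_trans (foldl_min_le_init l (min b x)) (min_le_right b x)
    · exact ih h (min b y)

lemma alt_fold_eq (fontes_recurso : List (List (String × String))) (b : Nat) (hb : b ≤ 3) :
    fontes_recurso.foldl pvStep b = (fontes_recurso.map pvR).foldl min b := by
  induction fontes_recurso generalizing b with
  | nil => rfl
  | cons f fs ih =>
    simp only [List.foldl, List.map]
    rw [pvStep_eq_min hb]
    exact ih _ (le_trans (min_le_left _ _) hb)

lemma pvR_eq_iff (f : List (String × String)) (t : String) (k : Nat)
    (hk : pvRankGet? t = some k) :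
    pvR f = k ↔ ∃ s, PySem.Dict.get? ⟨f⟩ "origem" = some s ∧ s ≠ "" ∧ PySem.Str.lower s = t := by
  have hk2 := pvRankGet?_le hk
  unfold pvR
  cases hg : PySem.Dict.get? ⟨f⟩ "origem" with
  | none => simp; omega
  | some s =>
    simp only
    by_cases hs : s = ""
    · simp [hs]; omega
    · simp only [hs, if_false, Option.some.injEq]
      constructor
      · intro h
        cases hr : pvRankGet? (PySem.Str.lower s) with
        | none => rw [hr] at h; simp at h; omega
        | some r =>
          rw [hr] at h; simp at h; subst h
          exact ⟨s, rfl, hs, pvRankGet?_inj hr hk⟩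
      · rintro ⟨s', hs', _, hl⟩
        cases hs'
        rw [hl, hk]; rfl

lemma mem_origens_rank (fontes_recurso : List (List (String × String))) (t : String) (k : Nat)
    (hk : pvRankGet? t = some k) :
    (t ∈ PySem.Set.ofList (pvOrigens fontes_recurso)) ↔ ∃ f ∈ fontes_recurso, pvR f = k := by
  rw [PySem.Set.mem_ofList]
  unfold pvOrigens
  simp only [List.mem_map, List.mem_filter]
  constructor
  · rintro ⟨f, ⟨hf, hc⟩, hl⟩
    refine ⟨f, hf, (pvR_eq_iff f t k hk).mpr ?_⟩
    cases hg : PySem.Dict.get? ⟨f⟩ "origem" with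
    | none => rw [hg] at hc; simp at hc
    | some s =>
      rw [hg] at hc
      simp at hc
      rw [PySem.Dict.getD_eq_get?_getD, hg] at hl
      exact ⟨s, rfl, hc, hl⟩
  · rintro ⟨f, hf, hr⟩
    obtain ⟨s, hg, hs, hl⟩ := (pvR_eq_iff f t k hk).mp hr
    refine ⟨f, ⟨hf, ?_⟩, ?_⟩
    · rw [hg]; simpa using hs
    · rw [PySem.Dict.getD_eq_get?_getD, hg]; exact hl

-- ===== VERDICT (by name: the statement is the Claim_ definition above) =====
theorem determine_origem_recurso_py_spec : Claim_equal_determine_origem_recurso_py := by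
  intro fs _
  unfold Spec_determine_origem_recurso_py determine_origem_recurso_py determine_origem_recurso_py_alt
  rw [alt_fold_eq fs 3 (le_refl 3)]
  set m := (fs.map pvR).foldl min 3 with hm
  have hmem : ∀ k, k ∈ fs.map pvR → ∃ f ∈ fs, pvR f = k := by
    intro k hk; simpa using hk
  by_cases hnil : fs = []
  · subst hnil; rfl
  rw [if_neg hnil]
  by_cases h0 : ∃ f ∈ fs, pvR f = 0
  · rw [if_pos ((mem_origens_rank fs "federal" 0 rfl).mpr h0)]
    obtain ⟨f, hf, hr⟩ := h0
    have : m ≤ 0 := foldl_min_le_of_mem (l := fs.map pvR) (x := 0)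
      (by exact List.mem_map.mpr ⟨f, hf, hr⟩) 3
    have hm0 : m = 0 := Nat.le_zero.mp this
    rw [hm0]; rfl
  rw [if_neg (by rw [mem_origens_rank fs "federal" 0 rfl]; exact h0)]
  have hnot0 : m ≠ 0 := by
    intro h
    rcases foldl_min_eq_or_mem (fs.map pvR) 3 with he | he
    · rw [← hm, h] at he; omega
    · exact h0 (by rw [← hm, h] at he; exact hmem 0 he)
  by_cases h1 : ∃ f ∈ fs, pvR f = 1
  · rw [if_pos ((mem_origens_rank fs "estadual" 1 rfl).mpr h1)]
    obtain ⟨f, hf, hr⟩ := h1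
    have hle : m ≤ 1 := foldl_min_le_of_mem (l := fs.map pvR) (x := 1)
      (List.mem_map.mpr ⟨f, hf, hr⟩) 3
    have hm1 : m = 1 := by omega
    rw [hm1]; rfl
  rw [if_neg (by rw [mem_origens_rank fs "estadual" 1 rfl]; exact h1)]
  have hnot1 : m ≠ 1 := by
    intro h
    rcases foldl_min_eq_or_mem (fs.map pvR) 3 with he | he
    · rw [← hm, h] at he; omega
    · exact h1 (by rw [← hm, h] at he; exact hmem 1 he)
  by_cases h2 : ∃ f ∈ fs, pvR f = 2
  · rw [if_pos ((mem_origens_rank fs "municipal" 2 rfl).mpr h2)]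
    obtain ⟨f, hf, hr⟩ := h2
    have hle : m ≤ 2 := foldl_min_le_of_mem (l := fs.map pvR) (x := 2)
      (List.mem_map.mpr ⟨f, hf, hr⟩) 3
    have hm2 : m = 2 := by omega
    rw [hm2]; rfl
  rw [if_neg (by rw [mem_origens_rank fs "municipal" 2 rfl]; exact h2)]
  have hnot2 : m ≠ 2 := by
    intro h
    rcases foldl_min_eq_or_mem (fs.map pvR) 3 with he | he
    · rw [← hm, h] at he; omega
    · exact h2 (by rw [← hm, h] at he; exact hmem 2 he)
  have hle : m ≤ 3 := foldl_min_le_init _ _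
  have hm3 : m = 3 := by omega
  rw [hm3]; rfl
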